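-- pv_equiv track=rewrite | github.com/tylermcm/ImageTriager | image_triage/fits_support.py | _split_value_and_comment
-- ===== SOURCE A (Python) =====
-- def _split_value_and_comment(value_section: str) -> str:
--     in_string = False
--     index = 0
--     while index < len(value_section):
--         char = value_section[index]
--         if char == "'":
--             if in_string and index + 1 < len(value_section) and value_section[index + 1] == "'":
--                 index += 2
--                 continue
--             in_string = not in_string
--         elif char == "/" and not in_string:
--             return value_section[:index]
--         index += 1
--     return value_section
-- ===== SOURCE B (Python) =====
-- def _split_value_and_comment(value_section: str) -> str:
--     # Consume whole quoted literals (incl. '' escapes) with an inner loop,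
--     # instead of tracking an in_string flag.
--     n = len(value_section)
--     i = 0
--     while i < n:
--         c = value_section[i]
--         if c == "/":
--             return value_section[:i]
--         if c == "'":
--             # scan to the closing quote of this string literal
--             j = i + 1
--             closed = False
--             while j < n:
--                 if value_section[j] == "'":
--                     if j + 1 < n and value_section[j + 1] == "'":
--                         j += 2
--                     else:
--                         j += 1
--                         closed = True
--                         break
--                 else:
--                     j += 1
--             if not closed:
--                 # unterminated literal: no comment delimiter can follow
--                 return value_section
--             i = j
--         else:
--             i += 1
--     return value_section
-- ===== Notes on version B (the rewrite author's own statement) =====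
-- stated objective: alternative
-- what changed: Replaces the single-scan boolean in_string state machine with a two-level loop: the outer loop only ever runs outside string literals and an inner loop consumes each quoted literal (including '' escapes) atomically, returning early on an unterminated literal.
import Mathlib
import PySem

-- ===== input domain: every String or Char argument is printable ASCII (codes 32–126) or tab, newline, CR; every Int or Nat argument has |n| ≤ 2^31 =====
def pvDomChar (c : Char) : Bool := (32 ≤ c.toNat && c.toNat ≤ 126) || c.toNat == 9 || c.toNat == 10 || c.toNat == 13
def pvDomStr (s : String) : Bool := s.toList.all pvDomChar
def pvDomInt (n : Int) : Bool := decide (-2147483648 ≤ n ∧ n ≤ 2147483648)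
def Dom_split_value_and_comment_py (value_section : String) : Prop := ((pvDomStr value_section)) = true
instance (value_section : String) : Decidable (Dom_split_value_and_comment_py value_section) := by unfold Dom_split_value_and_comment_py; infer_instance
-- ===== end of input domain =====

-- B replaces A's in_string boolean state machine by an outer loop over non-string
-- text with an inner loop that consumes each quoted literal atomically (alternative
-- decomposition, same cost); return values proved equal on all strings.

-- ===== PORT A =====
-- A's while loop as structural recursion on a fuel that bounds the remaining
-- iterations (the index strictly increases, so fuel = cs.length suffices).
-- 'index + 1 < len and value_section[index+1] == "'"' is ported as
-- cs[index+1]? = some ''' (exact: index + 1 ≥ 0); value_section[:index] with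
-- index ≥ 0 is cs.take index.
def pvGoA (cs : List Char) : Nat → Bool → Nat → String
  | 0, _, _ => String.ofList cs
  | fuel + 1, inStr, index =>
    if h : index < cs.length then
      if cs[index] = '\'' then
        if inStr = true ∧ cs[index + 1]? = some '\'' then
          pvGoA cs fuel inStr (index + 2)
        else
          pvGoA cs fuel (!inStr) (index + 1)
      else if cs[index] = '/' ∧ inStr = false then
        String.ofList (cs.take index)
      else
        pvGoA cs fuel inStr (index + 1)
    else
      String.ofList cs

def split_value_and_comment_py (value_section : String) : String :=
  pvGoA value_section.toList value_section.toList.length false 0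

-- ===== PORT B =====
-- B's inner while loop (consume one quoted literal, starting just after the
-- opening quote): returns the index just past the closing quote, or none if
-- the literal is unterminated ('closed' stays False).  Fuel as above.
def pvScanLit (cs : List Char) : Nat → Nat → Option Nat
  | 0, _ => none
  | fuel + 1, j =>
    if h : j < cs.length then
      if cs[j] = '\'' then
        if cs[j + 1]? = some '\'' then pvScanLit cs fuel (j + 2)
        else some (j + 1)
      else pvScanLit cs fuel (j + 1)
    else none

-- B's outer while loop: only ever runs outside string literals.
def pvGoB (cs : List Char) : Nat → Nat → String
  | 0, _ => String.ofList cs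
  | fuel + 1, i =>
    if h : i < cs.length then
      if cs[i] = '/' then String.ofList (cs.take i)
      else if cs[i] = '\'' then
        match pvScanLit cs cs.length (i + 1) with
        | some j => pvGoB cs fuel j
        | none => String.ofList cs
      else
        pvGoB cs fuel (i + 1)
    else
      String.ofList cs

def split_value_and_comment_py_alt (value_section : String) : String :=
  pvGoB value_section.toList value_section.toList.length 0

-- ===== PRECONDITION & SPEC =====
def Spec_split_value_and_comment_py (value_section : String) (out : String) : Prop := out = split_value_and_comment_py_alt value_section
instance (value_section : String) (out : String) : Decidable (Spec_split_value_and_comment_py value_section out) := by unfold Spec_split_value_and_comment_py; infer_instance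

-- ===== CLAIM (what is proved, stated in full; the proofs are below) =====
def Claim_equal_split_value_and_comment_py : Prop := ∀ (value_section : String), Dom_split_value_and_comment_py value_section → Spec_split_value_and_comment_py value_section (split_value_and_comment_py value_section)

-- ===== LEMMAS AND PROOFS =====

-- the inner scan only moves forward
theorem pvScanLit_lt (cs : List Char) : ∀ f j k, pvScanLit cs f j = some k → j < k := by
  intro f
  induction f with
  | zero => intro j k h; exact absurd h (by simp [pvScanLit])
  | succ f ih =>
    intro j k h
    rw [pvScanLit] at h
    split_ifs at h with h1 h2 h3
    · have := ih (j + 2) k h; omega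
    · cases h; omega
    · have := ih (j + 1) k h; omega

-- the inner scan does not depend on the fuel, once the fuel bounds the remaining length
theorem pvScanLit_congr (cs : List Char) : ∀ f f' j, cs.length - j ≤ f → cs.length - j ≤ f' →
    pvScanLit cs f j = pvScanLit cs f' j := by
  intro f
  induction f with
  | zero =>
    intro f' j hf hf'
    have hge : ¬ j < cs.length := by omega
    cases f' with
    | zero => rfl
    | succ f' => rw [pvScanLit, pvScanLit, dif_neg hge]
  | succ f ih =>
    intro f' j hf hf'
    cases f' with
    | zero =>
      have hge : ¬ j < cs.length := by omega
      rw [pvScanLit, pvScanLit, dif_neg hge]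
    | succ f' =>
      rw [pvScanLit, pvScanLit]
      by_cases h : j < cs.length
      · rw [dif_pos h, dif_pos h]
        by_cases hq : cs[j] = '\''
        · by_cases he : cs[j + 1]? = some '\''
          · rw [if_pos hq, if_pos hq, if_pos he, if_pos he]
            exact ih f' (j + 2) (by omega) (by omega)
          · rw [if_pos hq, if_pos hq, if_neg he, if_neg he]
        · rw [if_neg hq, if_neg hq]
          exact ih f' (j + 1) (by omega) (by omega)
      · rw [dif_neg h, dif_neg h]

-- the outer loop does not depend on the fuel either
theorem pvGoB_congr (cs : List Char) : ∀ f f' i, cs.length - i ≤ f → cs.length - i ≤ f' →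
    pvGoB cs f i = pvGoB cs f' i := by
  intro f
  induction f with
  | zero =>
    intro f' i hf hf'
    have hge : ¬ i < cs.length := by omega
    cases f' with
    | zero => rfl
    | succ f' => rw [pvGoB, pvGoB, dif_neg hge]
  | succ f ih =>
    intro f' i hf hf'
    cases f' with
    | zero =>
      have hge : ¬ i < cs.length := by omega
      rw [pvGoB, pvGoB, dif_neg hge]
    | succ f' =>
      rw [pvGoB, pvGoB]
      by_cases h : i < cs.length
      · rw [dif_pos h, dif_pos h]
        by_cases hs : cs[i] = '/'
        · rw [if_pos hs, if_pos hs]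
        · rw [if_neg hs, if_neg hs]
          by_cases hq : cs[i] = '\''
          · rw [if_pos hq, if_pos hq]
            cases hm : pvScanLit cs cs.length (i + 1) with
            | none => rfl
            | some j =>
              have hj := pvScanLit_lt cs cs.length (i + 1) j hm
              exact ih f' j (by omega) (by omega)
          · rw [if_neg hq, if_neg hq]
            exact ih f' (i + 1) (by omega) (by omega)
      · rw [dif_neg h, dif_neg h]

-- A's scan outside a literal equals B's outer loop; A's scan inside a literal equals
-- B's inner loop followed by the outer loop (or the whole string if unterminated).
theorem pvGoA_eq (cs : List Char) : ∀ f i, cs.length - i ≤ f →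
    pvGoA cs f false i = pvGoB cs f i ∧
    pvGoA cs f true i = (match pvScanLit cs f i with
                         | some j => pvGoB cs f j
                         | none => String.ofList cs) := by
  intro f
  induction f with
  | zero => intro i hi; exact ⟨rfl, rfl⟩
  | succ f ih =>
    intro i hi
    by_cases h : i < cs.length
    · constructor
      · rw [pvGoA, dif_pos h, pvGoB, dif_pos h]
        by_cases hq : cs[i] = '\''
        · have hs : ¬ cs[i] = '/' := by rw [hq]; decide
          rw [if_pos hq, if_neg (by simp), if_neg hs, if_pos hq,
              show (!false) = true from rfl, (ih (i + 1) (by omega)).2,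
              pvScanLit_congr cs f cs.length (i + 1) (by omega) (by omega)]
        · by_cases hs : cs[i] = '/'
          · rw [if_neg hq, if_pos ⟨hs, rfl⟩, if_pos hs]
          · rw [if_neg hq, if_neg (by simp [hs]), if_neg hs, if_neg hq]
            exact (ih (i + 1) (by omega)).1
      · rw [pvGoA, dif_pos h, pvScanLit, dif_pos h]
        by_cases hq : cs[i] = '\''
        · by_cases he : cs[i + 1]? = some '\''
          · rw [if_pos hq, if_pos ⟨rfl, he⟩, if_pos hq, if_pos he,
                (ih (i + 2) (by omega)).2]
            cases hm : pvScanLit cs f (i + 2) with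
            | none => rfl
            | some j =>
              have hj := pvScanLit_lt cs f (i + 2) j hm
              exact pvGoB_congr cs f (f + 1) j (by omega) (by omega)
          · rw [if_pos hq, if_neg (by simp [he]), if_pos hq, if_neg he,
                show (!true) = false from rfl, (ih (i + 1) (by omega)).1]
            exact pvGoB_congr cs f (f + 1) (i + 1) (by omega) (by omega)
        · rw [if_neg hq, if_neg (by simp), if_neg hq,
              (ih (i + 1) (by omega)).2]
          cases hm : pvScanLit cs f (i + 1) with
          | none => rfl
          | some j =>
            have hj := pvScanLit_lt cs f (i + 1) j hm
            exact pvGoB_congr cs f (f + 1) j (by omega) (by omega)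
    · have hge : ¬ i < cs.length := h
      rw [pvGoA, dif_neg hge, pvGoA, dif_neg hge, pvGoB, dif_neg hge,
          pvScanLit, dif_neg hge]
      exact ⟨rfl, rfl⟩

-- ===== VERDICT (by name: the statement is the Claim_ definition above) =====
theorem split_value_and_comment_py_spec : Claim_equal_split_value_and_comment_py := by
  intro s _
  show split_value_and_comment_py s = split_value_and_comment_py_alt s
  exact (pvGoA_eq s.toList s.toList.length 0 (by omega)).1
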